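-- pv_equiv track=rewrite | github.com/Oleksandra2020/Homework4 | genre_per_country.py | genre_for_country
-- ===== SOURCE A (Python) =====
-- def most_popular(lst):
--     """
--     (list) -> list(tuple)
--
--     Looks from the most common element in the list and returns the list of tuple containing the element
--     and the number of times it occurs
--
--     >>> most_popular(['Comedy', 'Comedy', 'Comedy', 'Documentary', 'Documentary', 'Biography'])
--     [('Comedy', 3)]
--     >>> most_popular(['Comedy', 'Comedy', 'Comedy', 'Documentary', 'Documentary', 'Documentary', 'Biography'])
--     [('Comedy', 3), ('Documentary', 3)]
--     """
--     dct = {}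
--     ls = []
--     count = 0
--     # Creates the dictionary. Keys are the elements and values are the numbers that represent how many times the item occurs
--     for el in lst:
--         if el not in dct.keys():
--             dct[el] = count
--         dct[el] += 1
--     max_val = max(dct.values())
--     for key in dct:
--         if dct[key] == max_val:
--             tp = key, max_val
--             ls.append(tp)
--     return ls
--
-- def genre_for_country(count_dct, gen_dct):
--     """
--     dict, dict -> dict
--     Returns the dictionary with the country and the genre
--
--     >>> genre_for_country({'USA': ['"#Besties" ', '"#Bikerlive" '], 'Italy': ['"#Besties" ']}, {'"#Besties" ': ['Short']})
--     {'USA': 'Short', 'Italy': 'Short'}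
--     >>> genre_for_country({'USA': ['"#Besties" ', '"#Bikerlive" '], 'Italy': ['"#Besties" ']}, {'"#Besties" ': ['Comedy'], '"#Bikerlive" ': ['Short']})
--     {'USA': 'Comedy', 'Italy': 'Comedy'}
--     """
--     new_dict = {}
--     final_dict = {}
--     # Loops through the dictionary and sets the country as a key with films as values, which are the keys to the dictionary with genres.
--     # Takes the value of each film and substitutes the film with genre(s)
--     for key in count_dct:
--         if key not in new_dict.keys():
--             new_dict[key] = []
--         for item in count_dct[key]:
--             if item in gen_dct.keys():
--                 new_dict[key].append(gen_dct[item][0])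
--     # Calculates the most common elements
--     for el in new_dict:
--         if new_dict[el] != []:
--             final_dict[el] = most_popular(new_dict[el])
--             final_dict[el] = final_dict[el][0][0]
--     return final_dict
-- ===== SOURCE B (Python) =====
-- def genre_for_country(count_dct, gen_dct):
--     """Single fused pass: per country, count genres directly and keep the
--     first genre reaching the maximal count (dict insertion order)."""
--     result = {}
--     for country, films in count_dct.items():
--         counts = {}
--         for film in films:
--             if film in gen_dct:
--                 g = gen_dct[film][0]
--                 counts[g] = counts.get(g, 0) + 1
--         best = None
--         best_c = 0
--         for g, c in counts.items():
--             if best is None or c > best_c: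
--                 best, best_c = g, c
--         if best is not None:
--             result[country] = best
--     return result
-- ===== Notes on version B (the rewrite author's own statement) =====
-- stated objective: simpler
-- what changed: B fuses A's two dict-building passes and its most_popular helper into one loop: per country it counts genres directly into a counter dict while scanning the films, then picks the first maximal genre with a running strict-max scan, instead of first materialising a genre list per country, re-counting it, and collecting the full list of tied maxima only to take its first element.
import Mathlib
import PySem

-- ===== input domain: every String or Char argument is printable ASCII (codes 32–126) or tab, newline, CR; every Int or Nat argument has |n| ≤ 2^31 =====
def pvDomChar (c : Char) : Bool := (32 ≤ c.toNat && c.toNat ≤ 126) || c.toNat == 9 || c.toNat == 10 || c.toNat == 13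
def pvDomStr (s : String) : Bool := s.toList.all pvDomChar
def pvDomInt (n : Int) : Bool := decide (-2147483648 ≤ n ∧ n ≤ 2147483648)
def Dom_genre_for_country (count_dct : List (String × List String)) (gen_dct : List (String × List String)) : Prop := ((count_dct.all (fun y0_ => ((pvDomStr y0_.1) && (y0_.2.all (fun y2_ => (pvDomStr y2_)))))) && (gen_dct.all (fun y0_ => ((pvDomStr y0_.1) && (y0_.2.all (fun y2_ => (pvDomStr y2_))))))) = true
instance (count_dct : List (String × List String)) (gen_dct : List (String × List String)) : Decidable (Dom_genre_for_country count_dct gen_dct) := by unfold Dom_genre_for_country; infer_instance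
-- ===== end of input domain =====

-- B fuses A's two passes and its most_popular helper into one counting loop per
-- country with a running first-strict-max scan (objective: simpler; same cost).


-- ===== PORT A =====
-- most_popular's counting dict (first loop of the helper)
def pvMPdct (lst : List String) : PySem.Dict String Int :=
  lst.foldl (fun d el => (if d.contains el then d else d.insert el 0).modify el 0 (· + 1)) PySem.Dict.empty

def pvMostPopular (lst : List String) : List (String × Int) :=
  match PySem.List.max? (pvMPdct lst).values (fun v => v) with
  | none => []  -- unreachable guard: Python's max raises only when lst = [], and A calls most_popular on non-empty lists only
  | some max_val =>
    (pvMPdct lst).keys.foldl (fun ls key => if (pvMPdct lst).getD key 0 == max_val then ls ++ [(key, max_val)] else ls) []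

-- A's first loop: new_dict maps each country to the genre list of its films
def pvNewDict (count_dct : List (String × List String)) (gen_dct : List (String × List String)) : PySem.Dict String (List String) :=
  count_dct.foldl (fun nd kv =>
    kv.2.foldl (fun nd2 item =>
      if (PySem.Dict.ofList gen_dct).contains item then
        nd2.modify kv.1 [] (fun l => l ++ [((PySem.Dict.ofList gen_dct).getD item []).headD ""])
      else nd2)
      (if nd.contains kv.1 then nd else nd.insert kv.1 ([] : List String)))
    PySem.Dict.empty

def genre_for_country (count_dct : List (String × List String)) (gen_dct : List (String × List String)) : List (String × String) :=
  (pvNewDict count_dct gen_dct).items.foldl (fun fd kv =>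
    if kv.2 ≠ [] then fd ++ [(kv.1, ((pvMostPopular kv.2).headD ("", 0)).1)] else fd) []

-- ===== PORT B =====
def genre_for_country_alt (count_dct : List (String × List String)) (gen_dct : List (String × List String)) : List (String × String) :=
  count_dct.foldl (fun res kv =>
    match (kv.2.foldl (fun c film =>
        if (PySem.Dict.ofList gen_dct).contains film then
          c.insert (((PySem.Dict.ofList gen_dct).getD film []).headD "")
            (c.getD (((PySem.Dict.ofList gen_dct).getD film []).headD "") 0 + 1)
        else c) (PySem.Dict.empty : PySem.Dict String Int)).items with
    | [] => res
    | p :: rest => res ++ [(kv.1, (rest.foldl (fun b q => if b.2 < q.2 then q else b) p).1)]) []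

-- ===== PRECONDITION & SPEC =====
-- Pre_ excludes (a) duplicate keys in either dict argument (impossible for a real Python dict, whose
-- keys are unique) and (b) inputs where some film listed under a country maps to an empty genre list,
-- on which A raises IndexError at gen_dct[item][0].
def Pre_genre_for_country (count_dct : List (String × List String)) (gen_dct : List (String × List String)) : Prop :=
  (count_dct.map Prod.fst).Nodup ∧ (gen_dct.map Prod.fst).Nodup ∧
  ∀ p ∈ count_dct, ∀ f ∈ p.2, ∀ q ∈ gen_dct, q.1 = f → q.2 ≠ []
instance (count_dct : List (String × List String)) (gen_dct : List (String × List String)) : Decidable (Pre_genre_for_country count_dct gen_dct) := by unfold Pre_genre_for_country; infer_instance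
def pvWitness_genre_for_country : (List (String × List String)) × (List (String × List String)) :=
  ([("USA", ["\"#Besties\" ", "\"#Bikerlive\" "]), ("Italy", ["\"#Besties\" "])], [("\"#Besties\" ", ["Short"])])

def Spec_genre_for_country (count_dct : List (String × List String)) (gen_dct : List (String × List String)) (out : List (String × String)) : Prop := out = genre_for_country_alt count_dct gen_dct
instance (count_dct : List (String × List String)) (gen_dct : List (String × List String)) (out : List (String × String)) : Decidable (Spec_genre_for_country count_dct gen_dct out) := by unfold Spec_genre_for_country; infer_instance

-- ===== CLAIM (what is proved, stated in full; the proofs are below) =====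
def Claim_equal_genre_for_country : Prop := ∀ (count_dct : List (String × List String)) (gen_dct : List (String × List String)), Dom_genre_for_country count_dct gen_dct → Pre_genre_for_country count_dct gen_dct → Spec_genre_for_country count_dct gen_dct (genre_for_country count_dct gen_dct)

-- ===== LEMMAS AND PROOFS =====

-- The genre A/B both read off for a film found in gen_dct
def pvG (gd : PySem.Dict String (List String)) (f : String) : String := (gd.getD f []).headD ""
-- The per-country genre list A materialises in new_dict
def pvGL (gd : PySem.Dict String (List String)) (films : List String) : List String :=
  (films.filter (fun f => gd.contains f)).map (pvG gd)
-- The first genre attaining the maximal count (both programs' pick), B's shape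
def pvPick (gs : List String) : String :=
  match (PySem.Dict.counter gs).items with
  | [] => ""
  | p :: rest => (rest.foldl (fun b q => if b.2 < q.2 then q else b) p).1

-- A's counting step in most_popular is Counter's step
lemma pvCountStep (d : PySem.Dict String Int) (el : String) :
    (if d.contains el then d else d.insert el 0).modify el 0 (· + 1) = d.modify el 0 (· + 1) := by
  by_cases h : d.contains el
  · simp [h]
  · simp only [Bool.not_eq_true] at h
    simp [h, PySem.Dict.modify, PySem.Dict.getD_insert_self, PySem.Dict.insert_insert_self,
      PySem.Dict.getD_of_not_contains d _ h]

lemma pvDct_eq_counter (lst : List String) : pvMPdct lst = PySem.Dict.counter lst := by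
  unfold pvMPdct
  simp only [pvCountStep]
  rw [PySem.Dict.counter_eq_foldl]

-- B's per-country counting over films is counting the genre list
lemma pvCounts_eq (gd : PySem.Dict String (List String)) (films : List String)
    (c : PySem.Dict String Int) :
    films.foldl (fun c film =>
        if gd.contains film then
          c.insert ((gd.getD film []).headD "") (c.getD ((gd.getD film []).headD "") 0 + 1)
        else c) c
      = (pvGL gd films).foldl (fun c g => c.insert g (c.getD g 0 + 1)) c := by
  induction films generalizing c with
  | nil => simp [pvGL]
  | cons f r ih =>
    by_cases h : gd.contains f
    · rw [List.foldl_cons, if_pos h, ih]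
      have hgl : pvGL gd (f :: r) = pvG gd f :: pvGL gd r := by
        simp [pvGL, h]
      rw [hgl, List.foldl_cons]
      rfl
    · simp only [Bool.not_eq_true] at h
      rw [List.foldl_cons]
      simp only [h, Bool.false_eq_true, if_false]
      rw [ih]
      have hgl : pvGL gd (f :: r) = pvGL gd r := by
        simp [pvGL, h]
      rw [hgl]

-- the running strict-max scan is PySem.List.max? on a cons
lemma pvFoldl_some_max {α : Type} (key : α → Int) (rest : List α) (p : α) :
    rest.foldl (fun acc x => match acc with
        | none => some x
        | some m => if key m < key x then some x else some m) (some p)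
      = some (rest.foldl (fun b q => if key b < key q then q else b) p) := by
  induction rest generalizing p with
  | nil => rfl
  | cons x r ih =>
    simp only [List.foldl_cons]
    rw [← apply_ite some (key p < key x) x p]
    exact ih _

lemma pvMax?_cons {α : Type} (key : α → Int) (p : α) (rest : List α) :
    PySem.List.max? (p :: rest) key = some (rest.foldl (fun b q => if key b < key q then q else b) p) := by
  simp only [PySem.List.max?, List.foldl_cons]
  exact pvFoldl_some_max key rest p

-- the scan over the mapped seconds computes the second of the pair scan
lemma pvFold_snd (rest : List (String × Int)) (p : String × Int) :
    rest.foldl (fun b q => if b < q.2 then q.2 else b) p.2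
      = (rest.foldl (fun b q => if b.2 < q.2 then q else b) p).2 := by
  induction rest generalizing p with
  | nil => rfl
  | cons x r ih =>
    simp only [List.foldl_cons]
    rw [← apply_ite Prod.snd (p.2 < x.2) x p]
    exact ih _

-- the scan returns the FIRST element attaining the maximal second component
lemma pvScan_spec (rest : List (String × Int)) (p : String × Int) :
    (∀ q ∈ p :: rest, q.2 ≤ (rest.foldl (fun b q => if b.2 < q.2 then q else b) p).2) ∧
    (p :: rest).find? (fun q => q.2 == (rest.foldl (fun b q => if b.2 < q.2 then q else b) p).2)
      = some (rest.foldl (fun b q => if b.2 < q.2 then q else b) p) := by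
  induction rest generalizing p with
  | nil => simp
  | cons r rest ih =>
    simp only [List.foldl_cons]
    by_cases h : p.2 < r.2
    · obtain ⟨hb, hf⟩ := ih r
      simp only [if_pos h]
      refine ⟨?_, ?_⟩
      · intro q hq
        rcases List.mem_cons.mp hq with hq | hq
        · subst hq; exact le_of_lt (lt_of_lt_of_le h (hb r (by simp)))
        · exact hb q hq
      · have hlt : p.2 < (rest.foldl (fun b q => if b.2 < q.2 then q else b) r).2 :=
          lt_of_lt_of_le h (hb r (by simp))
        have hpf : (p.2 == (rest.foldl (fun b q => if b.2 < q.2 then q else b) r).2) = false :=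
          beq_eq_false_iff_ne.mpr (by omega)
        simp only [List.find?_cons] at hf ⊢
        simp only [hpf]
        exact hf
    · obtain ⟨hb, hf⟩ := ih p
      simp only [if_neg h]
      refine ⟨?_, ?_⟩
      · intro q hq
        rcases List.mem_cons.mp hq with hq | hq
        · subst hq; exact hb q (by simp)
        · rcases List.mem_cons.mp hq with hq | hq
          · subst hq; exact le_trans (le_of_not_gt h) (hb p (by simp))
          · exact hb q (by simp [hq])
      · by_cases hp : (p.2 == (rest.foldl (fun b q => if b.2 < q.2 then q else b) p).2) = true
        · simp only [List.find?_cons] at hf ⊢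
          simp only [hp] at hf ⊢
          exact hf
        · have hpf : (p.2 == (rest.foldl (fun b q => if b.2 < q.2 then q else b) p).2) = false := by
            simpa using hp
          have hple : p.2 ≤ (rest.foldl (fun b q => if b.2 < q.2 then q else b) p).2 := hb p (by simp)
          have hrf : (r.2 == (rest.foldl (fun b q => if b.2 < q.2 then q else b) p).2) = false := by
            apply beq_eq_false_iff_ne.mpr
            have h1 : r.2 ≤ p.2 := le_of_not_gt h
            have h2 : p.2 ≠ (rest.foldl (fun b q => if b.2 < q.2 then q else b) p).2 := by simpa using hp
            omega
          simp only [List.find?_cons] at hf ⊢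
          simp only [hpf, hrf] at hf ⊢
          exact hf

lemma pvCounter_items_ne_nil (gs : List String) (h : gs ≠ []) :
    (PySem.Dict.counter gs).items ≠ [] := by
  intro hi
  rcases gs with _ | ⟨g, gs'⟩
  · exact h rfl
  · have : g ∈ (PySem.Dict.counter (g :: gs')).keys := by
      rw [PySem.Dict.keys_counter]
      exact (PySem.Set.mem_ofList _ _).mpr (by simp)
    rw [PySem.Dict.keys, hi] at this
    simp at this

-- A's head-of-most_popular equals B's scan pick, on a non-empty genre list
lemma pvMostPopular_head (gs : List String) (h : gs ≠ []) :
    ((pvMostPopular gs).headD ("", 0)).1 = pvPick gs := by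
  unfold pvMostPopular pvPick
  rw [pvDct_eq_counter]
  obtain ⟨p, rest, hitems⟩ : ∃ p rest, (PySem.Dict.counter gs).items = p :: rest := by
    rcases hi : (PySem.Dict.counter gs).items with _ | ⟨p, rest⟩
    · exact absurd hi (pvCounter_items_ne_nil gs h)
    · exact ⟨p, rest, rfl⟩
  set e := rest.foldl (fun b q => if b.2 < q.2 then q else b) p with he
  have hmax : PySem.List.max? (PySem.Dict.counter gs).values (fun v => v) = some e.2 := by
    have hvals : (PySem.Dict.counter gs).values = (p :: rest).map (·.2) := by
      rw [PySem.Dict.values, hitems]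
    rw [hvals, List.map_cons, pvMax?_cons]
    simp only [List.foldl_map]
    rw [pvFold_snd]
  simp only [hmax, hitems]
  -- A's collection loop is filter-then-map over the keys
  rw [show (fun (ls : List (String × Int)) (key : String) =>
        if (PySem.Dict.counter gs).getD key 0 == e.2 then ls ++ [(key, e.2)] else ls)
      = (fun ls key => if ((fun k => (PySem.Dict.counter gs).getD k 0 == e.2) key) = true
          then ls ++ [(fun k => (k, e.2)) key] else ls) from rfl,
    PySem.List.foldl_append_if]
  have hnd : (PySem.Dict.counter gs).keys.Nodup := PySem.Dict.nodup_keys_counter gs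
  have hfind : (PySem.Dict.counter gs).items.find? (fun q => q.2 == e.2) = some e := by
    rw [hitems]; exact (pvScan_spec rest p).2
  rw [PySem.Dict.items_eq_map_keys _ hnd 0, List.find?_map] at hfind
  obtain ⟨k0, hk0, hke⟩ := Option.map_eq_some_iff.mp hfind
  have hk0comp : (PySem.Dict.counter gs).keys.find? (fun k => (PySem.Dict.counter gs).getD k 0 == e.2) = some k0 := by
    rw [← hk0]; rfl
  have hfh : ((PySem.Dict.counter gs).keys.filter (fun k => (PySem.Dict.counter gs).getD k 0 == e.2)).head?
      = some k0 := by rw [List.head?_filter]; exact hk0comp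
  have hmh : ((((PySem.Dict.counter gs).keys.filter
        (fun k => (PySem.Dict.counter gs).getD k 0 == e.2)).map (fun k => (k, e.2))).headD ("", 0)) = (k0, e.2) := by
    rw [List.headD_eq_head?_getD, List.head?_map, hfh]
    rfl
  rw [List.nil_append, hmh]
  have : k0 = e.1 := by rw [← hke]
  rw [this, ← he]

-- A's inner film loop: keys unchanged, the k-entry grows by pvGL, other entries unchanged
lemma pvInner (gd : PySem.Dict String (List String)) (k : String) (films : List String)
    (nd : PySem.Dict String (List String)) (hk : nd.contains k = true) :
    (films.foldl (fun nd2 item =>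
        if gd.contains item then nd2.modify k [] (fun l => l ++ [(gd.getD item []).headD ""]) else nd2) nd).keys = nd.keys ∧
    (films.foldl (fun nd2 item =>
        if gd.contains item then nd2.modify k [] (fun l => l ++ [(gd.getD item []).headD ""]) else nd2) nd).getD k [] = nd.getD k [] ++ pvGL gd films ∧
    ∀ k', k' ≠ k →
      (films.foldl (fun nd2 item =>
        if gd.contains item then nd2.modify k [] (fun l => l ++ [(gd.getD item []).headD ""]) else nd2) nd).getD k' [] = nd.getD k' [] := by
  induction films generalizing nd with
  | nil => simp [pvGL]
  | cons f r ih =>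
    by_cases h : gd.contains f
    · have hk' : (nd.modify k [] (fun l => l ++ [(gd.getD f []).headD ""])).contains k = true := by
        rw [PySem.Dict.contains_modify]; simp
      obtain ⟨h1, h2, h3⟩ := ih _ hk'
      refine ⟨?_, ?_, ?_⟩
      · simp only [List.foldl_cons, if_pos h, h1]
        rw [PySem.Dict.keys_modify, PySem.Dict.keys_insert_of_contains _ _ hk]
      · simp only [List.foldl_cons, if_pos h, h2, PySem.Dict.getD_modify_self]
        simp [pvGL, h, pvG]
      · intro k' hne
        simp only [List.foldl_cons, if_pos h, h3 k' hne]
        exact PySem.Dict.getD_modify_of_ne _ _ _ hne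
    · simp only [Bool.not_eq_true] at h
      obtain ⟨h1, h2, h3⟩ := ih nd hk
      refine ⟨?_, ?_, ?_⟩
      · simpa [h] using h1
      · simp only [List.foldl_cons, h, Bool.false_eq_true, if_false, h2]
        simp [pvGL, h]
      · intro k' hne
        simpa [h] using h3 k' hne

-- A's outer loop builds exactly the per-country genre lists, in order
lemma pvOuter (gd : PySem.Dict String (List String)) (cd : List (String × List String))
    (nd : PySem.Dict String (List String)) (hnd : (nd.keys ++ cd.map Prod.fst).Nodup) :
    (cd.foldl (fun nd kv =>
        kv.2.foldl (fun nd2 item =>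
          if gd.contains item then nd2.modify kv.1 [] (fun l => l ++ [(gd.getD item []).headD ""]) else nd2)
          (if nd.contains kv.1 then nd else nd.insert kv.1 ([] : List String))) nd).items
      = nd.items ++ cd.map (fun kv => (kv.1, pvGL gd kv.2)) := by
  induction cd generalizing nd with
  | nil => simp
  | cons kv cd' ih =>
    have hndk : nd.keys.Nodup := (List.nodup_append.mp hnd).1
    have hdisj := (List.nodup_append.mp hnd).2.2
    have hfresh : nd.contains kv.1 = false := by
      rw [← Bool.not_eq_true, PySem.Dict.contains_iff_mem_keys]
      intro hmem
      exact hdisj _ hmem _ (by simp) rfl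
    have hins : (nd.insert kv.1 ([] : List String)).contains kv.1 = true :=
      PySem.Dict.contains_insert_self ..
    have hkeys1 : (nd.insert kv.1 ([] : List String)).keys = nd.keys ++ [kv.1] :=
      PySem.Dict.keys_insert_of_not_contains _ _ hfresh
    obtain ⟨hK, hS, hO⟩ := pvInner gd kv.1 kv.2 (nd.insert kv.1 ([] : List String)) hins
    set R := kv.2.foldl (fun nd2 item =>
        if gd.contains item then nd2.modify kv.1 [] (fun l => l ++ [(gd.getD item []).headD ""]) else nd2)
        (nd.insert kv.1 ([] : List String)) with hR
    have hRkeys : R.keys = nd.keys ++ [kv.1] := by rw [hK, hkeys1]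
    have hRnodup : (R.keys ++ cd'.map Prod.fst).Nodup := by
      rw [hRkeys, List.append_assoc]
      simpa using hnd
    have hRitems : R.items = nd.items ++ [(kv.1, pvGL gd kv.2)] := by
      have hRnd : R.keys.Nodup := (List.nodup_append.mp hRnodup).1
      rw [PySem.Dict.items_eq_map_keys R hRnd ([] : List String), hRkeys, List.map_append]
      rw [PySem.Dict.items_eq_map_keys nd hndk ([] : List String)]
      congr 1
      · apply List.map_congr_left
        intro k hkmem
        have hne : k ≠ kv.1 := by
          intro hEq
          exact hdisj _ hkmem _ (by simp) hEq
        rw [hO k hne, PySem.Dict.getD_insert_of_ne _ _ _ hne]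
      · simp only [List.map_cons, List.map_nil]
        rw [hS, PySem.Dict.getD_insert_self]
        simp
    simp only [List.foldl_cons]
    rw [show (if nd.contains kv.1 then nd else nd.insert kv.1 ([] : List String)) = nd.insert kv.1 [] from by simp [hfresh]]
    rw [← hR, ih R hRnodup, hRitems]
    simp

-- empty counter items ↔ empty list
lemma pvCounter_items_cons (gs : List String) (p : String × Int) (rest : List (String × Int))
    (h : (PySem.Dict.counter gs).items = p :: rest) : gs ≠ [] := by
  intro hEq; subst hEq
  simp [PySem.Dict.counter, PySem.Dict.empty] at h

-- B equals the common shape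
lemma pvB_eq_common (cd gen_dct : List (String × List String)) :
    genre_for_country_alt cd gen_dct
      = cd.foldl (fun res kv =>
          if pvGL (PySem.Dict.ofList gen_dct) kv.2 ≠ [] then
            res ++ [(kv.1, pvPick (pvGL (PySem.Dict.ofList gen_dct) kv.2))] else res) [] := by
  unfold genre_for_country_alt
  congr 1
  funext res kv
  simp only [pvCounts_eq, PySem.Dict.foldl_insert_getD_add_one_eq_counter]
  rcases hi : (PySem.Dict.counter (pvGL (PySem.Dict.ofList gen_dct) kv.2)).items with _ | ⟨p, rest⟩
  · have hnil : pvGL (PySem.Dict.ofList gen_dct) kv.2 = [] := by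
      by_contra hne
      exact pvCounter_items_ne_nil _ hne hi
    simp [hnil]
  · have hne : pvGL (PySem.Dict.ofList gen_dct) kv.2 ≠ [] := pvCounter_items_cons _ p rest hi
    simp only [if_pos hne, pvPick, hi]

-- A equals the common shape, given distinct country keys
lemma pvA_eq_common (cd gen_dct : List (String × List String)) (hnd : (cd.map Prod.fst).Nodup) :
    genre_for_country cd gen_dct
      = cd.foldl (fun res kv =>
          if pvGL (PySem.Dict.ofList gen_dct) kv.2 ≠ [] then
            res ++ [(kv.1, pvPick (pvGL (PySem.Dict.ofList gen_dct) kv.2))] else res) [] := by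
  unfold genre_for_country pvNewDict
  rw [pvOuter (PySem.Dict.ofList gen_dct) cd PySem.Dict.empty (by simpa using hnd)]
  rw [show (PySem.Dict.empty : PySem.Dict String (List String)).items = [] from rfl, List.nil_append]
  rw [List.foldl_map]
  congr 1
  funext fd kv
  by_cases h : pvGL (PySem.Dict.ofList gen_dct) kv.2 ≠ []
  · simp only [if_pos h, pvMostPopular_head _ h]
  · simp only [if_neg h]

-- ===== VERDICT (by name: the statement is the Claim_ definition above) =====
theorem genre_for_country_spec : Claim_equal_genre_for_country := by
  intro count_dct gen_dct _ hpre
  unfold Spec_genre_for_country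
  rw [pvA_eq_common count_dct gen_dct hpre.1, pvB_eq_common count_dct gen_dct]
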